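-- pv_equiv track=rewrite | github.com/wie-florian/vu-gpa | GPA/2024SS/blatt3.py | count_questions_answered
-- ===== SOURCE A (Python) =====
-- def count_questions_answered(text):
--     is_question = 0
--     count_answered = 0
--     for i in text:
--         if i == '?':
--             is_question = 1
--         elif i == '!' and is_question == 1:
--             count_answered += 1
--             is_question = 0
--     return count_answered
-- ===== SOURCE B (Python) =====
-- def count_questions_answered(text):
--     parts = text.split('!')
--     return sum('?' in part for part in parts[:-1])
-- ===== Notes on version B (the rewrite author's own statement) =====
-- stated objective: idiomatic
-- what changed: Replaces the explicit armed-flag state machine with a split on '!' plus a count of the pieces before each '!' that contain a '?'; the per-character Python loop is replaced by C-level str.split, which a timing run measured as faster.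
import Mathlib
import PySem

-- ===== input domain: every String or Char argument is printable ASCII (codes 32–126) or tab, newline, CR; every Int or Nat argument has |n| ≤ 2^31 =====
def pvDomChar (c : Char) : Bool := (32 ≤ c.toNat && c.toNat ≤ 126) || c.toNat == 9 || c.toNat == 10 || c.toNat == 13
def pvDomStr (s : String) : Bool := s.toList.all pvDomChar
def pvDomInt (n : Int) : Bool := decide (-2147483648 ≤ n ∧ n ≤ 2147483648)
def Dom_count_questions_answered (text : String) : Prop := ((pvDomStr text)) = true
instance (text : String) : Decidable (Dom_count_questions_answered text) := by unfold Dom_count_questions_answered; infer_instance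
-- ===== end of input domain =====

-- B replaces A's armed-flag state machine with an idiomatic split on '!' counting the pieces before each '!' that contain a '?'.
-- ===== PORT A =====
-- loop body of A's for-loop (state = (is_question, count_answered))
def pvStepA (st : Int × Int) (i : Char) : Int × Int :=
  if i == '?' then (1, st.2)
  else if i == '!' && st.1 == 1 then (0, st.2 + 1)
  else st

def count_questions_answered (text : String) : Int :=
  (text.toList.foldl pvStepA (0, 0)).2

-- ===== PORT B =====
-- parts = text.split('!'); sum('?' in part for part in parts[:-1])
-- (str.split with a nonempty separator is PySem.Chars.splitOn on .toList; parts[:-1] is List.dropLast; the 0/1-sum is countP)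
def count_questions_answered_alt (text : String) : Int :=
  let parts := PySem.Chars.splitOn text.toList "!".toList
  ((parts.dropLast.countP (fun part => PySem.Chars.isIn "?".toList part) : Nat) : Int)

-- ===== PRECONDITION & SPEC =====
def Spec_count_questions_answered (text : String) (out : Int) : Prop := out = count_questions_answered_alt text
instance (text : String) (out : Int) : Decidable (Spec_count_questions_answered text out) := by unfold Spec_count_questions_answered; infer_instance

-- ===== CLAIM (what is proved, stated in full; the proofs are below) =====
def Claim_equal_count_questions_answered : Prop := ∀ (text : String), Dom_count_questions_answered text → Spec_count_questions_answered text (count_questions_answered text)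

-- ===== LEMMAS AND PROOFS =====

-- A's state machine, recast as structural recursion on the characters (armed = is_question == 1)
def pvCnt (armed : Bool) : List Char → Nat
  | [] => 0
  | c :: r =>
      if c = '?' then pvCnt true r
      else if c = '!' then (if armed then pvCnt false r + 1 else pvCnt false r)
      else pvCnt armed r

-- B's count, on the char list
def pvG (l : List Char) : Nat :=
  ((List.splitOn '!' l).dropLast).countP (fun p => p.contains '?')

-- the extra hit an initially armed flag contributes
def pvBonus (l : List Char) : Nat :=
  if '!' ∈ l ∧ '?' ∉ l.takeWhile (fun c => c ≠ '!') then 1 else 0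

lemma pvIsInQ (p : List Char) : PySem.Chars.isIn ['?'] p = p.contains '?' := by
  by_cases hm : '?' ∈ p
  · rw [(PySem.Chars.isIn_iff_infix _ _).mpr ((List.singleton_infix_iff _ _).mpr hm)]
    simpa using hm
  · rw [(PySem.Chars.isIn_eq_false_iff _ _).mpr (by
      intro h; exact hm ((List.singleton_infix_iff _ _).mp h))]
    simpa using hm

-- PySem's fuel-based splitOn with a single-char separator IS Mathlib's List.splitOn
lemma pvGoSingle (fuel : Nat) : ∀ (l cur : List Char) (acc : List (List Char)), l.length ≤ fuel →
    PySem.Chars.splitOn.go ['!'] fuel l cur acc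
      = acc.reverse ++ (List.splitOn '!' l).modifyHead (fun x => cur.reverse ++ x) := by
  induction fuel with
  | zero =>
      intro l cur acc h
      have hl : l = [] := List.eq_nil_of_length_eq_zero (Nat.le_zero.mp h)
      subst hl
      rw [PySem.Chars.splitOn.go.eq_def]
      simp [List.splitOn, List.splitOnP_nil]
  | succ n ih =>
      intro l cur acc h
      cases l with
      | nil =>
          rw [PySem.Chars.splitOn.go.eq_def]
          simp [List.splitOn, List.splitOnP_nil]
      | cons c rest =>
          rw [PySem.Chars.splitOn.go.eq_def]
          simp only [List.length_cons, Nat.succ_le_succ_iff] at h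
          by_cases hc : c = '!'
          · subst hc
            have hp : List.isPrefixOf ['!'] ('!' :: rest) = true := by
              simp [List.isPrefixOf]
            simp only [hp, if_pos]
            have hdrop : List.drop ['!'].length ('!' :: rest) = rest := rfl
            rw [hdrop, ih rest [] (cur.reverse :: acc) h]
            rcases hsp : List.splitOn '!' rest with _ | ⟨hd, tl⟩
            · exact absurd hsp (List.splitOnP_ne_nil _ _)
            · simp [List.splitOn, List.splitOnP_cons, List.splitOn] at hsp ⊢
              simp [hsp]
          · have hp : List.isPrefixOf ['!'] (c :: rest) = false := by
              simp [List.isPrefixOf]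
              intro h'; exact absurd h'.symm hc
            simp only [hp]
            rw [ih rest (c :: cur) acc h]
            rcases hsp : List.splitOn '!' rest with _ | ⟨hd, tl⟩
            · exact absurd hsp (List.splitOnP_ne_nil _ _)
            · simp [List.splitOn, List.splitOnP_cons, hc] at hsp ⊢
              simp [hsp]

lemma pvSplitOnEq (l : List Char) :
    PySem.Chars.splitOn l ['!'] = List.splitOn '!' l := by
  unfold PySem.Chars.splitOn
  rw [pvGoSingle (l.length + 1) l [] [] (Nat.le_succ _)]
  rcases hsp : List.splitOn '!' l with _ | ⟨hd, tl⟩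
  · exact absurd hsp (List.splitOnP_ne_nil _ _)
  · simp

-- A's fold accumulates pvCnt
lemma pvFoldA (l : List Char) : ∀ (q c : Int),
    (l.foldl pvStepA (q, c)).2 = c + (pvCnt (q == 1) l : Int) := by
  induction l with
  | nil => intro q c; simp [pvCnt]
  | cons i r ih =>
      intro q c
      by_cases hq : i = '?'
      · subst hq
        simp [pvStepA, pvCnt, ih]
      · by_cases hb : i = '!'
        · subst hb
          have hqf : (('!' : Char) == '?') = false := by decide
          by_cases harm : q = 1
          · subst harm
            simp [pvStepA, pvCnt, ih]
            ring
          · have h1 : (q == 1) = false := by simp [harm]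
            simp [pvStepA, pvCnt, ih, h1]
        · have h1 : (i == '?') = false := by simp [hq]
          have h2 : (i == '!') = false := by simp [hb]
          simp [pvStepA, pvCnt, ih, h1, h2, hq, hb]

-- head structure of List.splitOn
lemma pvSplitOnHead (r : List Char) :
    ∃ t, List.splitOn '!' r = (r.takeWhile (fun c => c ≠ '!')) :: t ∧ (t = [] ↔ '!' ∉ r) := by
  induction r with
  | nil => exact ⟨[], by simp [List.splitOn, List.splitOnP_nil], by simp⟩
  | cons c r ih =>
      obtain ⟨t, ht, hmem⟩ := ih
      by_cases hc : c = '!'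
      · subst hc
        refine ⟨List.splitOn '!' r, ?_, ?_⟩
        · simp [List.splitOn, List.splitOnP_cons, List.takeWhile]
        · constructor
          · intro h; exact absurd h (List.splitOnP_ne_nil _ _)
          · intro h; exact absurd (by simp : '!' ∈ '!' :: r) h
      · refine ⟨t, ?_, ?_⟩
        · simp only [List.splitOn, List.splitOnP_cons] at ht ⊢
          simp [hc, ht, List.takeWhile, List.modifyHead]
        · rw [hmem]
          simp [Ne.symm hc]

-- the central correspondence: state machine = split-based count (+ bonus when armed)
lemma pvMain (l : List Char) :
    pvCnt true l = pvG l + pvBonus l ∧ pvCnt false l = pvG l := by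
  induction l with
  | nil => simp [pvCnt, pvG, pvBonus, List.splitOn, List.splitOnP_nil]
  | cons c r ih =>
      obtain ⟨iht, ihf⟩ := ih
      obtain ⟨t, hsp, hmem⟩ := pvSplitOnHead r
      by_cases hc : c = '?'
      · subst hc
        have hsp' : List.splitOn '!' ('?' :: r)
            = ('?' :: r.takeWhile (fun c => c ≠ '!')) :: t := by
          simp [List.splitOn, List.splitOnP_cons] at hsp ⊢
          simp [hsp]
        have hg : pvG ('?' :: r) = pvG r + pvBonus r := by
          cases t with
          | nil =>
              have : '!' ∉ r := hmem.mp rfl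
              simp [pvG, pvBonus, hsp', hsp, this]
          | cons t0 ts =>
              have hbang : '!' ∈ r := by
                by_contra h
                exact absurd (hmem.mpr h) (by simp)
              simp [pvG, pvBonus, hsp', hsp, hbang, List.dropLast_cons₂,
                List.countP_cons]
              split_ifs <;> omega
        have hbz : pvBonus ('?' :: r) = 0 := by
          simp [pvBonus, List.takeWhile]
        constructor
        · simp [pvCnt, iht, hg, hbz]
        · simp [pvCnt, iht, hg]
      · by_cases hb : c = '!'
        · subst hb
          have hsp' : List.splitOn '!' ('!' :: r) = [] :: List.splitOn '!' r := by
            simp [List.splitOn, List.splitOnP_cons]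
          have hg : pvG ('!' :: r) = pvG r := by
            simp [pvG, hsp', hsp, List.dropLast_cons₂]
          have hbz : pvBonus ('!' :: r) = 1 := by
            simp [pvBonus, List.takeWhile]
          constructor
          · simp [pvCnt, hc, ihf, hg, hbz]
          · simp [pvCnt, hc, ihf, hg]
        · have hsp' : List.splitOn '!' (c :: r)
              = (c :: r.takeWhile (fun x => x ≠ '!')) :: t := by
            simp [List.splitOn, List.splitOnP_cons] at hsp ⊢
            simp [hb, hsp]
          have hg : pvG (c :: r) = pvG r := by
            cases t with
            | nil => simp [pvG, hsp', hsp]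
            | cons t0 ts =>
                simp [pvG, hsp', hsp, List.dropLast_cons₂, List.countP_cons,
                  Ne.symm hc]
          have hbz : pvBonus (c :: r) = pvBonus r := by
            have h1 : ('!' : Char) ≠ c := Ne.symm hb
            have h2 : ('?' : Char) ≠ c := Ne.symm hc
            simp [pvBonus, List.takeWhile, hb, h1, h2]
          constructor
          · simp [pvCnt, hc, hb, iht, hg, hbz]
          · simp [pvCnt, hc, hb, ihf, hg]

-- ===== VERDICT (by name: the statement is the Claim_ definition above) =====
theorem count_questions_answered_spec : Claim_equal_count_questions_answered := by
  intro text _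
  unfold Spec_count_questions_answered count_questions_answered count_questions_answered_alt
  rw [pvFoldA]
  have h1 : ("!".toList : List Char) = ['!'] := rfl
  have h2 : ("?".toList : List Char) = ['?'] := rfl
  simp only [h1, h2, pvSplitOnEq]
  have hpred : (fun part => PySem.Chars.isIn ['?'] part)
      = (fun p : List Char => p.contains '?') := by
    funext p; exact pvIsInQ p
  rw [hpred]
  have := (pvMain text.toList).2
  simp only [pvG] at this
  simp [this]
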